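-- pv_equiv track=rewrite | github.com/Vanesor/paany_hackrx_amazon | main.py | _combine_pages_parallel
-- ===== SOURCE A (Python) =====
-- from typing import List, Dict, Any, Tuple, Optional, Union
-- from concurrent.futures import ThreadPoolExecutor, as_completed
--
-- def _combine_pages_parallel(pages: List[Tuple[int, str]]) -> Tuple[str, Dict[int, int]]:
--     """Combine pages in parallel for better performance"""
--     if len(pages) <= 4:
--         # Sequential for small documents
--         full_text, char_to_page_map = "", {}
--         for page_num, page_text in pages:
--             start_char = len(full_text)
--             clean_page_text = page_text + "\n\n"
--             full_text += clean_page_text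
--             for i in range(start_char, len(full_text), max(1, len(clean_page_text) // 100)):
--                 char_to_page_map[i] = page_num
--         return full_text, char_to_page_map
--
--     # Parallel processing for larger documents
--     def process_page_chunk(page_group):
--         text_parts = []
--         char_maps = []
--         current_offset = 0
--
--         for page_num, page_text in page_group:
--             start_char = current_offset
--             clean_page_text = page_text + "\n\n"
--             text_parts.append(clean_page_text)
--             end_char = current_offset + len(clean_page_text)
--
--             page_map = {}
--             for i in range(start_char, end_char, max(1, len(clean_page_text) // 100)):
--                 page_map[i] = page_num
--             char_maps.append(page_map)
--             current_offset = end_char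
--
--         return "".join(text_parts), char_maps
--
--     # Split pages into chunks for parallel processing
--     chunk_size = max(2, len(pages) // min(4, len(pages)))
--     page_chunks = [pages[i:i + chunk_size] for i in range(0, len(pages), chunk_size)]
--
--     # Process chunks in parallel with memory-aware limits
--     max_workers = min(6, len(page_chunks))  # Increased for ultra-fast speed
--     with ThreadPoolExecutor(max_workers=max_workers) as executor:
--         chunk_results = list(executor.map(process_page_chunk, page_chunks))
--
--     # Combine results efficiently
--     full_text = ""
--     char_to_page_map = {}
--
--     for chunk_text, chunk_maps in chunk_results:
--         text_offset = len(full_text)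
--         full_text += chunk_text
--
--         # Adjust character mappings efficiently
--         for char_map in chunk_maps:
--             for char_pos, page_num in char_map.items():
--                 char_to_page_map[char_pos + text_offset] = page_num
--
--     return full_text, char_to_page_map
-- ===== SOURCE B (Python) =====
-- def _combine_pages_parallel(pages):
--     """Single sequential pass: running offset + parts list; no chunking, no threads."""
--     parts = []
--     char_to_page_map = {}
--     offset = 0
--     for page_num, page_text in pages:
--         start = offset
--         n = len(page_text) + 2
--         step = max(1, n // 100)
--         parts.append(page_text + "\n\n")
--         offset += n
--         for i in range(start, offset, step):
--             char_to_page_map[i] = page_num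
--     return "".join(parts), char_to_page_map
-- ===== Notes on version B (the rewrite author's own statement) =====
-- stated objective: simpler
-- what changed: Replaces A's build-then-merge structure (small/large branch, chunk splitting, ThreadPoolExecutor over per-chunk folds producing per-page maps, then a second offset-adjusting re-insertion loop) with one sequential pass keeping a running offset, a parts list joined once at the end, and direct writes into the char-to-page map.
import Mathlib
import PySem

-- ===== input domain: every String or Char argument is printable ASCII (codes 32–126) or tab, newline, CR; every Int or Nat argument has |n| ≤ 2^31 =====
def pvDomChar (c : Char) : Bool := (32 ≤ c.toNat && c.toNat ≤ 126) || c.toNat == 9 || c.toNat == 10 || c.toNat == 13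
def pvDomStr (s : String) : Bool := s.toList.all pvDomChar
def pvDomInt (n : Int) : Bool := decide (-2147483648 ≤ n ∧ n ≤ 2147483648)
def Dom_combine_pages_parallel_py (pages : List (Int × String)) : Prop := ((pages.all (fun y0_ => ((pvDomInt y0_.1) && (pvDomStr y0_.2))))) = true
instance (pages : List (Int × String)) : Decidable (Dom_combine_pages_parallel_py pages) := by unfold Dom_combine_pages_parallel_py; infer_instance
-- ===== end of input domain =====

-- B replaces A's chunk-split / thread-pool / offset-remerge structure by one sequential pass
-- (running offset + parts list); objective: simpler. Return value proved equal on every input.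


-- ===== PORT A =====
-- page_text + "\n\n"
def pvClean (s : String) : List Char := s.toList ++ ['\n', '\n']

-- one iteration of A's sequential (len <= 4) loop; text carried as List Char
def pvAseqStep (acc : List Char × PySem.Dict Int Int) (p : Int × String) :
    List Char × PySem.Dict Int Int :=
  let start_char : Int := acc.1.length
  let clean := pvClean p.2
  let full := acc.1 ++ clean
  let step := max 1 (PySem.Int.floordiv (clean.length : Int) 100)
  (full, (PySem.List.pyRange start_char (full.length : Int) step).foldl
           (fun d i => d.insert i p.1) acc.2)

-- one iteration of process_page_chunk's loop: (current_offset, text_parts, char_maps)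
def pvChunkStep (st : Int × List (List Char) × List (PySem.Dict Int Int)) (p : Int × String) :
    Int × List (List Char) × List (PySem.Dict Int Int) :=
  let start_char := st.1
  let clean := pvClean p.2
  let end_char := st.1 + (clean.length : Int)
  let step := max 1 (PySem.Int.floordiv (clean.length : Int) 100)
  let page_map := (PySem.List.pyRange start_char end_char step).foldl
      (fun d i => d.insert i p.1) PySem.Dict.empty
  (end_char, st.2.1 ++ [clean], st.2.2 ++ [page_map])

def pvProcessPageChunk (chunk : List (Int × String)) : List Char × List (PySem.Dict Int Int) :=
  let r := chunk.foldl pvChunkStep (0, [], [])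
  (r.2.1.flatten, r.2.2)

-- the merge loop's body: shift one chunk's char_maps by len(full_text) and re-insert
def pvMergeStep (acc : List Char × PySem.Dict Int Int)
    (cr : List Char × List (PySem.Dict Int Int)) : List Char × PySem.Dict Int Int :=
  let text_offset : Int := acc.1.length
  (acc.1 ++ cr.1,
   cr.2.foldl (fun d cm => cm.items.foldl (fun d' kv => d'.insert (kv.1 + text_offset) kv.2) d)
     acc.2)

def combine_pages_parallel_py (pages : List (Int × String)) : String × (List (Int × Int)) :=
  if pages.length ≤ 4 then
    let r := pages.foldl pvAseqStep ([], PySem.Dict.empty)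
    (String.ofList r.1, r.2.items)
  else
    let chunk_size := max 2 (PySem.Int.floordiv (pages.length : Int) (min 4 (pages.length : Int)))
    let page_chunks := (PySem.List.pyRange 0 (pages.length : Int) chunk_size).map
        (fun i => PySem.List.slice pages (some i) (some (i + chunk_size)))
    -- executor.map preserves chunk order, so the thread pool is a plain map
    let chunk_results := page_chunks.map pvProcessPageChunk
    let r := chunk_results.foldl pvMergeStep ([], PySem.Dict.empty)
    (String.ofList r.1, r.2.items)

-- ===== PORT B =====
-- B's single pass: state (offset, parts, char_to_page_map)
def pvBStep (st : Int × List (List Char) × PySem.Dict Int Int) (p : Int × String) :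
    Int × List (List Char) × PySem.Dict Int Int :=
  let start := st.1
  let n : Int := (p.2.toList.length : Int) + 2
  let step := max 1 (PySem.Int.floordiv n 100)
  let parts := st.2.1 ++ [p.2.toList ++ ['\n', '\n']]
  let off := st.1 + n
  (off, parts, (PySem.List.pyRange start off step).foldl (fun d i => d.insert i p.1) st.2.2)

def combine_pages_parallel_py_alt (pages : List (Int × String)) : String × (List (Int × Int)) :=
  let r := pages.foldl pvBStep (0, [], PySem.Dict.empty)
  (String.ofList r.2.1.flatten, r.2.2.items)

-- ===== PRECONDITION & SPEC =====
def Spec_combine_pages_parallel_py (pages : List (Int × String)) (out : String × (List (Int × Int))) : Prop := out = combine_pages_parallel_py_alt pages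
instance (pages : List (Int × String)) (out : String × (List (Int × Int))) : Decidable (Spec_combine_pages_parallel_py pages out) := by unfold Spec_combine_pages_parallel_py; infer_instance

-- ===== CLAIM (what is proved, stated in full; the proofs are below) =====
def Claim_equal_combine_pages_parallel_py : Prop := ∀ (pages : List (Int × String)), Dom_combine_pages_parallel_py pages → Spec_combine_pages_parallel_py pages (combine_pages_parallel_py pages)

-- ===== LEMMAS AND PROOFS =====

theorem pvBStep_acc (l : List (Int × String)) (off : Int) (ps : List (List Char))
    (d : PySem.Dict Int Int) :
    l.foldl pvBStep (off, ps, d) =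
      ((l.foldl pvBStep (off, [], d)).1,
       ps ++ (l.foldl pvBStep (off, [], d)).2.1,
       (l.foldl pvBStep (off, [], d)).2.2) := by
  induction l generalizing off ps d with
  | nil => simp
  | cons a l ih =>
    simp only [List.foldl_cons, pvBStep, List.nil_append]
    rw [ih, ih _ [a.2.toList ++ ['\n', '\n']] _]
    simp

theorem pyRange_pos_nodup (a b st : Int) (h : 0 < st) : (PySem.List.pyRange a b st).Nodup := by
  rw [PySem.List.pyRange_of_pos a b h]
  refine List.Nodup.map ?_ (List.nodup_range)
  intro x y hxy
  simp only at hxy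
  have h2 : st * (x : Int) = st * (y : Int) := by linarith
  have := mul_left_cancel₀ (by omega : st ≠ 0) h2
  exact_mod_cast this

theorem pyRange_pos_shift (a b st t : Int) (h : 0 < st) :
    (PySem.List.pyRange a b st).map (· + t) = PySem.List.pyRange (a + t) (b + t) st := by
  rw [PySem.List.pyRange_of_pos a b h, PySem.List.pyRange_of_pos (a + t) (b + t) h]
  by_cases hab : a < b
  · rw [if_pos hab, if_pos (by omega : a + t < b + t), List.map_map]
    have e1 : b + t - (a + t) = b - a := by ring
    rw [e1]
    exact List.map_congr_left (fun k _ => by simp; ring)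
  · rw [if_neg hab, if_neg (by omega : ¬ a + t < b + t)]
    simp

theorem merge_one_map (a b st t : Int) (h : 0 < st) (v : Int) (d : PySem.Dict Int Int) :
    (((PySem.List.pyRange a b st).foldl (fun d i => d.insert i v)
        PySem.Dict.empty).items).foldl (fun d' kv => d'.insert (kv.1 + t) kv.2) d =
      (PySem.List.pyRange (a + t) (b + t) st).foldl (fun d i => d.insert i v) d := by
  rw [PySem.Dict.items_foldl_insert_fresh (PySem.List.pyRange a b st) (fun i => i) (fun _ => v)
      PySem.Dict.empty (by simp) (by simpa using pyRange_pos_nodup a b st h)]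
  rw [← pyRange_pos_shift a b st t h]
  simp [List.foldl_map, PySem.Dict.empty]

theorem pvChunkStep_acc (l : List (Int × String)) (off : Int) (ps : List (List Char))
    (ms : List (PySem.Dict Int Int)) :
    l.foldl pvChunkStep (off, ps, ms) =
      ((l.foldl pvChunkStep (off, [], [])).1,
       ps ++ (l.foldl pvChunkStep (off, [], [])).2.1,
       ms ++ (l.foldl pvChunkStep (off, [], [])).2.2) := by
  induction l generalizing off ps ms with
  | nil => simp
  | cons a l ih =>
    simp only [List.foldl_cons, pvChunkStep, List.nil_append]
    rw [ih, ih _ [pvClean a.2] _]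
    simp

theorem chunk_eq_seq (c : List (Int × String)) (s t : Int) (full : List Char)
    (d : PySem.Dict Int Int) (hst : s + t = (full.length : Int)) :
    (full ++ (c.foldl pvChunkStep (s, [], [])).2.1.flatten,
     (c.foldl pvChunkStep (s, [], [])).2.2.foldl
       (fun d cm => cm.items.foldl (fun d' kv => d'.insert (kv.1 + t) kv.2) d) d) =
      c.foldl pvAseqStep (full, d) := by
  induction c generalizing s full d with
  | nil => simp
  | cons a c ih =>
    simp only [List.foldl_cons, pvChunkStep, List.nil_append]
    rw [pvChunkStep_acc]
    have hpos : (0 : Int) < max 1 (PySem.Int.floordiv ((pvClean a.2).length : Int) 100) := by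
      simp
    have hm := merge_one_map s (s + ((pvClean a.2).length : Int))
        (max 1 (PySem.Int.floordiv ((pvClean a.2).length : Int) 100)) t hpos a.1 d
    have hd : pvAseqStep (full, d) a =
        (full ++ pvClean a.2,
         (PySem.List.pyRange (s + t) (s + ((pvClean a.2).length : Int) + t)
             (max 1 (PySem.Int.floordiv ((pvClean a.2).length : Int) 100))).foldl
           (fun d i => d.insert i a.1) d) := by
      simp only [pvAseqStep]
      have e : (((full ++ pvClean a.2).length : Nat) : Int) =
          s + ((pvClean a.2).length : Int) + t := by
        push_cast [List.length_append]
        omega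
      rw [e, ← hst]
    have hih := ih (s + ((pvClean a.2).length : Int)) (full ++ pvClean a.2)
        ((PySem.List.pyRange (s + t) (s + ((pvClean a.2).length : Int) + t)
             (max 1 (PySem.Int.floordiv ((pvClean a.2).length : Int) 100))).foldl
           (fun d i => d.insert i a.1) d)
        (by push_cast [List.length_append]; omega)
    rw [hd, ← hih]
    simp only [List.flatten_append, List.flatten_cons, List.flatten_nil, List.append_nil,
      List.foldl_append, List.foldl_cons, List.foldl_nil]
    rw [hm, ← List.append_assoc]

theorem merge_eq_seq (chunks : List (List (Int × String))) (full : List Char)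
    (d : PySem.Dict Int Int) :
    (chunks.map pvProcessPageChunk).foldl pvMergeStep (full, d) =
      chunks.flatten.foldl pvAseqStep (full, d) := by
  induction chunks generalizing full d with
  | nil => simp
  | cons c cs ih =>
    simp only [List.map_cons, List.foldl_cons, List.flatten_cons, List.foldl_append]
    rw [show pvMergeStep (full, d) (pvProcessPageChunk c) = c.foldl pvAseqStep (full, d) from ?_]
    · exact ih _ _
    · have := chunk_eq_seq c 0 (full.length : Int) full d (by omega)
      simpa [pvMergeStep, pvProcessPageChunk] using this

theorem seq_eq_b (l : List (Int × String)) (full : List Char) (d : PySem.Dict Int Int) :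
    l.foldl pvAseqStep (full, d) =
      (full ++ (l.foldl pvBStep ((full.length : Int), [], d)).2.1.flatten,
       (l.foldl pvBStep ((full.length : Int), [], d)).2.2) := by
  induction l generalizing full d with
  | nil => simp
  | cons a l ih =>
    simp only [List.foldl_cons, pvAseqStep, pvBStep, pvClean, List.nil_append]
    rw [pvBStep_acc]
    rw [ih]
    simp only [List.length_append, List.length_cons, List.length_nil]
    push_cast
    ring_nf
    simp [List.append_assoc]

theorem pyRange_pos_nil (a b st : Int) (h : 0 < st) (hba : b ≤ a) :
    PySem.List.pyRange a b st = [] := by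
  rw [PySem.List.pyRange_of_pos a b h]
  simp [show ¬ a < b by omega]

theorem pyRange_pos_cons (a b st : Int) (h : 0 < st) (hab : a < b) :
    PySem.List.pyRange a b st = a :: PySem.List.pyRange (a + st) b st := by
  rw [PySem.List.pyRange_of_pos a b h, PySem.List.pyRange_of_pos (a + st) b h]
  have hdiv : (b - a + st - 1) / st = (b - (a + st) + st - 1) / st + 1 := by
    have h2 := Int.add_mul_ediv_right (b - (a + st) + st - 1) 1 (by omega : st ≠ 0)
    rw [show b - a + st - 1 = b - (a + st) + st - 1 + 1 * st by ring, h2]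
  by_cases h2 : a + st < b
  · have hnn : 0 ≤ (b - (a + st) + st - 1) / st := Int.ediv_nonneg (by omega) (by omega)
    rw [if_pos hab, if_pos h2, hdiv]
    rw [show ((b - (a + st) + st - 1) / st + 1).toNat = ((b - (a + st) + st - 1) / st).toNat + 1 by omega]
    rw [List.range_succ_eq_map]
    simp only [List.map_cons, List.map_map, Nat.cast_zero, mul_zero, add_zero]
    congr 1
    exact List.map_congr_left (fun k _ => by simp [Function.comp]; ring)
  · have h0 : (b - (a + st) + st - 1) / st = 0 :=
      Int.ediv_eq_zero_of_lt (by omega) (by omega)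
    rw [if_pos hab, if_neg h2, hdiv, h0]
    simp


theorem slices_flatten {α : Type} (n : Nat) (xs : List α) (hn : xs.length ≤ n)
    (cs : Int) (hcs : 0 < cs) :
    ((PySem.List.pyRange 0 (xs.length : Int) cs).map
        (fun i => PySem.List.slice xs (some i) (some (i + cs)))).flatten = xs := by
  induction n generalizing xs with
  | zero =>
    have hx : xs = [] := List.eq_nil_of_length_eq_zero (by omega)
    subst hx
    simp [pyRange_pos_nil 0 0 cs hcs (by omega)]
  | succ n ih =>
    by_cases hx : xs = []
    · subst hx; simp [pyRange_pos_nil 0 0 cs hcs (by omega)]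
    · have hlen : 0 < xs.length := List.length_pos_iff.mpr hx
      rw [pyRange_pos_cons 0 (xs.length : Int) cs hcs (by exact_mod_cast hlen)]
      simp only [List.map_cons, List.flatten_cons, zero_add]
      rw [PySem.List.slice_zero_start, PySem.List.slice_to xs (by omega : (0:Int) ≤ cs)]
      by_cases hbig : (xs.length : Int) ≤ cs
      · rw [pyRange_pos_nil cs (xs.length : Int) cs hcs hbig]
        simp [List.take_of_length_le (by omega : xs.length ≤ cs.toNat)]
      · rw [not_le] at hbig
        have hshift : PySem.List.pyRange cs (xs.length : Int) cs =
            (PySem.List.pyRange 0 ((xs.length : Int) - cs) cs).map (· + cs) := by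
          rw [pyRange_pos_shift 0 ((xs.length : Int) - cs) cs cs hcs]
          congr 1 <;> ring
        rw [hshift, List.map_map]
        have hcong : ∀ i ∈ PySem.List.pyRange 0 ((xs.length : Int) - cs) cs,
            ((fun i => PySem.List.slice xs (some i) (some (i + cs))) ∘ (· + cs)) i =
              PySem.List.slice (xs.drop cs.toNat) (some i) (some (i + cs)) := by
          intro i hi
          have h0i : 0 ≤ i := ((PySem.List.mem_pyRange_iff_of_pos hcs i).mp hi).1
          simp only [Function.comp]
          rw [PySem.List.slice_toNat xs (by omega) (by omega),
              PySem.List.slice_toNat (xs.drop cs.toNat) (by omega) (by omega)]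
          rw [List.drop_drop]
          have e1 : (i + cs + cs).toNat - (i + cs).toNat = (i + cs).toNat - i.toNat := by omega
          have e2 : (i + cs).toNat = cs.toNat + i.toNat := by omega
          rw [e1, e2]
        rw [List.map_congr_left hcong]
        have hys : ((xs.drop cs.toNat).length : Int) = (xs.length : Int) - cs := by
          simp
          omega
        rw [show PySem.List.pyRange 0 ((xs.length : Int) - cs) cs =
              PySem.List.pyRange 0 (((xs.drop cs.toNat).length : Nat) : Int) cs by rw [hys]]
        rw [ih (xs.drop cs.toNat) (by simp; omega)]
        exact List.take_append_drop cs.toNat xs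

-- ===== VERDICT (by name: the statement is the Claim_ definition above) =====
theorem combine_pages_parallel_py_spec : Claim_equal_combine_pages_parallel_py := by
  intro pages _
  unfold Spec_combine_pages_parallel_py
  unfold combine_pages_parallel_py combine_pages_parallel_py_alt
  by_cases h4 : pages.length ≤ 4
  · rw [if_pos h4]
    have h := seq_eq_b pages [] PySem.Dict.empty
    simp only [List.length_nil, Nat.cast_zero, List.nil_append] at h
    rw [h]
  · rw [if_neg h4]
    dsimp only
    have hcs : (0 : Int) < max 2 (PySem.Int.floordiv (pages.length : Int)
        (min 4 (pages.length : Int))) := by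
      have h1 : (2 : Int) ≤ max 2 (PySem.Int.floordiv (pages.length : Int)
          (min 4 (pages.length : Int))) := le_max_left _ _
      omega
    rw [merge_eq_seq]
    rw [slices_flatten pages.length pages (le_refl _) _ hcs]
    have h := seq_eq_b pages [] PySem.Dict.empty
    simp only [List.length_nil, Nat.cast_zero, List.nil_append] at h
    rw [h]
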